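-- pv_equiv track=rewrite | github.com/Hiteration/antiCrawlerVisualizationV2 | LogVisualization/datagenerate/methods/periodismAnalyse.py | get_max_nseq
-- ===== SOURCE A (Python) =====
-- def get_max_nseq(seq, nseq):
--     if(len(seq) < nseq):
--         return 0
--     tmp_dic = {}
--     for i in range(len(seq) - nseq + 1):
--         key = ''
--         for j in range(i, i+nseq):
--           key += seq[j]
--
--         if(key in tmp_dic.keys()):
--             tmp_dic[key] += 1
--         else:
--             tmp_dic[key] = 1
--     return max(tmp_dic.values())
-- ===== SOURCE B (Python) =====
-- def get_max_nseq(seq, nseq):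
--     if len(seq) < nseq:
--         return 0
--     subs = sorted(seq[i:i+nseq] for i in range(len(seq) - nseq + 1))
--     prev = subs[0]
--     run = 1
--     best = 1
--     for x in subs[1:]:
--         if x == prev:
--             run += 1
--             if run > best:
--                 best = run
--         else:
--             run = 1
--         prev = x
--     return best
-- ===== Notes on version B (the rewrite author's own statement) =====
-- stated objective: faster
-- what changed: Replaces the hash-dict of hand-concatenated keys (inner character loop plus a max over dict values) by slicing of the windows followed by one sort and a single linear scan tracking the longest run of equal adjacent substrings; Pre_ excludes negative nseq, where a length-nseq substring is undefined and A's count of empty concatenations and B's Python-slice windows are both implementation accidents.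
-- outside the precondition, e.g. on get_max_nseq('abc', -1): A returns 5, B returns 4
import Mathlib
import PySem

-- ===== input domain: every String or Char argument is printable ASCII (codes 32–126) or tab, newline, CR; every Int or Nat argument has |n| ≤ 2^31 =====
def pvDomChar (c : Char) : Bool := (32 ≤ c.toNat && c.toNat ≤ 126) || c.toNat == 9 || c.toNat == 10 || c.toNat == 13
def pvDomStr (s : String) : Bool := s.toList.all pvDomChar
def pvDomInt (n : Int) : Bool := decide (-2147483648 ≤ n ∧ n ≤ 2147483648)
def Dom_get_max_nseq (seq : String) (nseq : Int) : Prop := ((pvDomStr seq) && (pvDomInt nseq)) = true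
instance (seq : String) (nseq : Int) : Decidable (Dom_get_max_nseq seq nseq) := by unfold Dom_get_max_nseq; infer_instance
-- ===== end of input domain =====

-- B replaces A's hash-dict counting of hand-concatenated window keys by slicing the windows,
-- sorting them once, and scanning for the longest run of equal adjacent substrings.


-- ===== PORT A =====
def get_max_nseq (seq : String) (nseq : Int) : Int :=
  let s := seq.toList
  if PySem.List.len s < nseq then 0
  else
    let d := (PySem.List.pyRange 0 (PySem.List.len s - nseq + 1)).foldl
      (fun (d : PySem.Dict (List Char) Int) i =>
        let key := (PySem.List.pyRange i (i + nseq)).foldl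
          (fun k j => k ++ [PySem.List.pyGetD s j ' ']) ([] : List Char)
        if d.contains key then d.insert key (d.getD key 0 + 1) else d.insert key 1)
      PySem.Dict.empty
    match PySem.List.max? d.values (fun v => v) with
    | some m => m
    | none => 0  -- unreachable: the dict is nonempty whenever len(seq) ≥ nseq

-- ===== PORT B =====
-- the loop body of Source B's scan; state (prev, run, best)
def pvScanStep (st : List Char × Int × Int) (x : List Char) : List Char × Int × Int :=
  if x = st.1 then (x, st.2.1 + 1, if st.2.1 + 1 > st.2.2 then st.2.1 + 1 else st.2.2)
  else (x, 1, st.2.2)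

def get_max_nseq_alt (seq : String) (nseq : Int) : Int :=
  let s := seq.toList
  if PySem.List.len s < nseq then 0
  else
    let subs := (PySem.List.pyRange 0 (PySem.List.len s - nseq + 1)).map
      (fun i => PySem.List.slice s (some i) (some (i + nseq)))
    match PySem.List.sorted subs (fun x => x) false with
    | [] => 0  -- unreachable: subs is nonempty whenever len(seq) ≥ nseq
    | h :: t => (t.foldl pvScanStep (h, (1 : Int), (1 : Int))).2.2

-- ===== PRECONDITION & SPEC =====
-- Pre_ excludes negative nseq (A still returns there): a length-nseq substring is undefined for
-- nseq < 0, and A's count of empty concatenations and B's Python-slice windows are both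
-- implementation accidents on that corner.
def Pre_get_max_nseq (seq : String) (nseq : Int) : Prop := 0 ≤ nseq
instance (seq : String) (nseq : Int) : Decidable (Pre_get_max_nseq seq nseq) := by unfold Pre_get_max_nseq; infer_instance
def pvWitness_get_max_nseq : String × Int := ("abab", 2)

def Spec_get_max_nseq (seq : String) (nseq : Int) (out : Int) : Prop := out = get_max_nseq_alt seq nseq
instance (seq : String) (nseq : Int) (out : Int) : Decidable (Spec_get_max_nseq seq nseq out) := by unfold Spec_get_max_nseq; infer_instance

-- ===== CLAIM (what is proved, stated in full; the proofs are below) =====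
def Claim_equal_get_max_nseq : Prop := ∀ (seq : String) (nseq : Int), Dom_get_max_nseq seq nseq → Pre_get_max_nseq seq nseq → Spec_get_max_nseq seq nseq (get_max_nseq seq nseq)

-- ===== LEMMAS AND PROOFS =====

-- A's inner key-building loop produces exactly B's slice, for an in-range window start.
lemma pv_keys_eq (s : List Char) (nseq i : Int) (h0 : 0 ≤ i) (hn : 0 ≤ nseq)
    (hub : i + nseq ≤ (s.length : Int)) :
    (PySem.List.pyRange i (i + nseq)).foldl
      (fun k j => k ++ [PySem.List.pyGetD s j ' ']) ([] : List Char)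
    = PySem.List.slice s (some i) (some (i + nseq)) := by
  rw [PySem.List.foldl_append_singleton_eq_map, List.nil_append,
      PySem.List.slice_toNat s h0 (by omega)]
  have hsplit := PySem.List.pyRange_one_append i (i + nseq) (PySem.List.len s) (by omega)
    (by simp [PySem.List.len]; omega)
  have h1 : (PySem.List.pyRange i (PySem.List.len s)).map
      (fun j => PySem.List.pyGetD s j ' ') = s.drop i.toNat :=
    PySem.List.map_pyGetD_pyRange s ' ' h0
  rw [hsplit, List.map_append] at h1
  have hlen : ((PySem.List.pyRange i (i + nseq)).map
      (fun j => PySem.List.pyGetD s j ' ')).length = (i + nseq).toNat - i.toNat := by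
    simp [PySem.List.length_pyRange_one]; omega
  rw [← h1, List.take_left' hlen]

-- every element of a ≤-sorted list is ≤ its last element
lemma pv_le_getLast (l : List (List Char)) (a : List Char)
    (h : l.Pairwise (· ≤ ·)) (hl : l.getLast? = some a) : ∀ x ∈ l, x ≤ a := by
  induction l with
  | nil => simp at hl
  | cons b t ih =>
    intro x hx
    cases t with
    | nil => simp at hl hx; simp [hx, hl]
    | cons c t' =>
      rw [List.getLast?_cons_cons] at hl
      have hmem : a ∈ c :: t' := List.mem_of_getLast? hl
      rcases List.mem_cons.mp hx with rfl | hx'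
      · exact (List.pairwise_cons.mp h).1 a hmem
      · exact ih (List.pairwise_cons.mp h).2 hl x hx'


-- invariant of Source B's scan over the sorted list: prev is the last element of the processed
-- prefix P, run is its multiplicity in P, best is the maximal multiplicity over P
lemma pv_scan_inv (S : List (List Char)) :
    ∀ (P : List (List Char)) (prev : List Char) (run best : Int),
    (P ++ S).Pairwise (· ≤ ·) →
    P.getLast? = some prev →
    run = (P.count prev : Int) →
    (∀ x ∈ P, ((P.count x : Int)) ≤ best) →
    (∃ x ∈ P, ((P.count x : Int)) = best) →
    (∀ x ∈ P ++ S, (((P ++ S).count x : Int)) ≤ (S.foldl pvScanStep (prev, run, best)).2.2) ∧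
    (∃ x ∈ P ++ S, (((P ++ S).count x : Int)) = (S.foldl pvScanStep (prev, run, best)).2.2) := by
  induction S with
  | nil =>
    intro P prev run best hpw hlast hrun hbound hex
    simpa using ⟨hbound, hex⟩
  | cons x S ih =>
    intro P prev run best hpw hlast hrun hbound hex
    have hPne : P ≠ [] := by intro h; subst h; simp at hlast
    have hprevP : prev ∈ P := List.mem_of_getLast? hlast
    have hassoc : (P ++ [x]) ++ S = P ++ x :: S := by simp
    have hpw' : ((P ++ [x]) ++ S).Pairwise (· ≤ ·) := by rw [hassoc]; exact hpw
    simp only [List.foldl_cons]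
    by_cases hx : x = prev
    · subst hx
      have hstep : pvScanStep (x, run, best) x
          = (x, run + 1, if run + 1 > best then run + 1 else best) := by simp [pvScanStep]
      rw [hstep]
      have hcount : (run + 1 : Int) = ((P ++ [x]).count x : Int) := by
        simp [List.count_append, hrun]
      have hbound' : ∀ y ∈ P ++ [x], (((P ++ [x]).count y : Int))
          ≤ (if run + 1 > best then run + 1 else best) := by
        intro y hy
        by_cases hyx : y = x
        · subst hyx
          rw [← hcount]; split <;> omega
        · have hyP : y ∈ P := by
            rcases List.mem_append.mp hy with h | h
            · exact h
            · simp at h; exact absurd h hyx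
          have : ((P ++ [x]).count y) = P.count y := by
            simp [List.count_append, Ne.symm hyx]
          rw [this]
          have := hbound y hyP
          split <;> omega
      have hex' : ∃ y ∈ P ++ [x], (((P ++ [x]).count y : Int))
          = (if run + 1 > best then run + 1 else best) := by
        by_cases hgt : run + 1 > best
        · exact ⟨x, by simp, by rw [← hcount]; simp [hgt]⟩
        · obtain ⟨w, hwP, hwc⟩ := hex
          have hwx : w ≠ x := by
            rintro rfl
            rw [hrun] at hgt
            omega
          refine ⟨w, by simp [hwP], ?_⟩
          have : ((P ++ [x]).count w) = P.count w := by
            simp [List.count_append, Ne.symm hwx]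
          rw [this, hwc]; simp [hgt]
      have := ih (P ++ [x]) x (run + 1) (if run + 1 > best then run + 1 else best)
        hpw' List.getLast?_concat hcount hbound' hex'
      rwa [hassoc] at this
    · have hxP : x ∉ P := by
        intro hxP
        have hcross := (List.pairwise_append.mp hpw).2.2
        have h1 : prev ≤ x := hcross prev hprevP x (by simp)
        have h2 : x ≤ prev :=
          pv_le_getLast P prev (List.pairwise_append.mp hpw).1 hlast x hxP
        exact hx (le_antisymm h2 h1)
      have hstep : pvScanStep (prev, run, best) x = (x, 1, best) := by
        simp [pvScanStep, hx]
      rw [hstep]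
      have hcount : (1 : Int) = ((P ++ [x]).count x : Int) := by
        simp [List.count_append, List.count_eq_zero.mpr hxP]
      have hbest1 : (1 : Int) ≤ best := by
        have h1 := hbound prev hprevP
        have h2 : 0 < P.count prev := List.count_pos_iff.mpr hprevP
        omega
      have hbound' : ∀ y ∈ P ++ [x], (((P ++ [x]).count y : Int)) ≤ best := by
        intro y hy
        by_cases hyx : y = x
        · subst hyx; rw [← hcount]; exact hbest1
        · have hyP : y ∈ P := by
            rcases List.mem_append.mp hy with h | h
            · exact h
            · simp at h; exact absurd h hyx
          have : ((P ++ [x]).count y) = P.count y := by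
            simp [List.count_append, Ne.symm hyx]
          rw [this]; exact hbound y hyP
      have hex' : ∃ y ∈ P ++ [x], (((P ++ [x]).count y : Int)) = best := by
        obtain ⟨w, hwP, hwc⟩ := hex
        have hwx : w ≠ x := fun h => hxP (h ▸ hwP)
        refine ⟨w, by simp [hwP], ?_⟩
        have : ((P ++ [x]).count w) = P.count w := by
          simp [List.count_append, Ne.symm hwx]
        rw [this, hwc]
      have := ih (P ++ [x]) x 1 best hpw' List.getLast?_concat hcount hbound' hex'
      rwa [hassoc] at this

lemma pv_main (seq : String) (nseq : Int) (hpre : 0 ≤ nseq) :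
    get_max_nseq seq nseq = get_max_nseq_alt seq nseq := by
  unfold get_max_nseq get_max_nseq_alt
  by_cases hlt : PySem.List.len seq.toList < nseq
  · rw [if_pos hlt, if_pos hlt]
  · rw [if_neg hlt, if_neg hlt]
    dsimp only
    set s := seq.toList with hs
    have hle : nseq ≤ (s.length : Int) := by
      simp [PySem.List.len] at hlt; omega
    set R := PySem.List.pyRange 0 (PySem.List.len s - nseq + 1) with hR
    set LB := R.map (fun i => PySem.List.slice s (some i) (some (i + nseq))) with hLB
    have hkeys : R.map (fun i => (PySem.List.pyRange i (i + nseq)).foldl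
        (fun k j => k ++ [PySem.List.pyGetD s j ' ']) ([] : List Char)) = LB := by
      apply List.map_congr_left
      intro i hi
      rw [hR, PySem.List.mem_pyRange_one] at hi
      refine pv_keys_eq s nseq i hi.1 hpre ?_
      have := hi.2; simp [PySem.List.len] at this; omega
    have hdict : R.foldl
        (fun (d : PySem.Dict (List Char) Int) i =>
          let key := (PySem.List.pyRange i (i + nseq)).foldl
            (fun k j => k ++ [PySem.List.pyGetD s j ' ']) ([] : List Char)
          if d.contains key then d.insert key (d.getD key 0 + 1) else d.insert key 1)
        PySem.Dict.empty = PySem.Dict.counter LB := by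
      rw [← PySem.Dict.foldl_insert_getD_add_one_eq_counter, ← hkeys, List.foldl_map]
      congr 1
      funext d i
      generalize (PySem.List.pyRange i (i + nseq)).foldl
          (fun k j => k ++ [PySem.List.pyGetD s j ' ']) ([] : List Char) = k
      by_cases h : d.contains k
      · simp [h]
      · have hnone : d.get? k = none :=
          (PySem.Dict.get?_eq_none_iff_contains d k).mpr (by simpa using h)
        simp [h, PySem.Dict.getD, hnone]
    rw [hdict]
    -- values of the counter
    have hvals : (PySem.Dict.counter LB).values
        = (PySem.Set.ofList LB).map (fun k => ((LB.count k : Int))) := by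
      simp [PySem.Dict.values, PySem.Dict.items_counter, List.map_map]
    rw [hvals]
    -- nonemptiness
    have h0R : (0 : Int) ∈ R := by
      rw [hR, PySem.List.mem_pyRange_one]
      constructor
      · omega
      · simp [PySem.List.len]; omega
    have hLBne : LB ≠ [] := by
      rw [hLB]
      simp only [ne_eq, List.map_eq_nil_iff]
      exact List.ne_nil_of_mem h0R
    obtain ⟨b0, LB', hLBc⟩ := List.exists_cons_of_ne_nil hLBne
    have hVne : (PySem.Set.ofList LB).map (fun k => ((LB.count k : Int))) ≠ [] := by
      simp only [ne_eq, List.map_eq_nil_iff]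
      apply List.ne_nil_of_mem (a := b0)
      rw [PySem.Set.mem_ofList]
      rw [hLBc]; simp
    obtain ⟨m, hmax⟩ : ∃ m, PySem.List.max?
        ((PySem.Set.ofList LB).map (fun k => ((LB.count k : Int)))) (fun v => v) = some m := by
      cases h : PySem.List.max?
          ((PySem.Set.ofList LB).map (fun k => ((LB.count k : Int)))) (fun v => v) with
      | none => exact absurd ((PySem.List.max?_eq_none_iff _ _).mp h) hVne
      | some m => exact ⟨m, rfl⟩
    rw [hmax]
    -- characterize m
    obtain ⟨k0, hk0set, hk0⟩ := List.mem_map.mp (PySem.List.max?_mem hmax)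
    have hk0LB : k0 ∈ LB := (PySem.Set.mem_ofList _ _).mp hk0set
    have hmmax : ∀ y ∈ LB, ((LB.count y : Int)) ≤ m := by
      intro y hy
      exact PySem.List.max?_isMax hmax _ (List.mem_map.mpr ⟨y, (PySem.Set.mem_ofList _ _).mpr hy, rfl⟩)
    -- B side
    have hFP : (PySem.List.sorted LB (fun x : List Char => x) false).Perm LB :=
      PySem.List.sorted_perm _ _ _
    have hFne : PySem.List.sorted LB (fun x : List Char => x) false ≠ [] := by
      rw [ne_eq, PySem.List.sorted_eq_nil_iff]; exact hLBne
    obtain ⟨h, t, hF⟩ := List.exists_cons_of_ne_nil hFne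
    rw [hF]
    have hFpw : (h :: t).Pairwise (fun a b : List Char => a ≤ b) := by
      rw [← hF]
      have h0 := PySem.List.sorted_pairwise LB (fun x : List Char => x)
      convert h0 using 2
    have hinv := pv_scan_inv t [h] h 1 1 (by simpa using hFpw) (by simp) (by simp)
      (by intro x hx; simp at hx; simp [hx]) ⟨h, by simp, by simp⟩
    rw [List.singleton_append] at hinv
    obtain ⟨hrmax, x1, hx1F, hx1⟩ := hinv
    -- transfer counts through the permutation
    have hcnt : ∀ y, (h :: t).count y = LB.count y := by
      intro y; exact (hF ▸ hFP).count_eq y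
    -- antisymmetry
    have h1 : m ≤ (t.foldl pvScanStep (h, 1, 1)).2.2 := by
      rw [← hk0]
      have : k0 ∈ h :: t := ((hF ▸ hFP).mem_iff).mpr hk0LB
      have := hrmax k0 this
      rwa [hcnt k0] at this
    have h2 : (t.foldl pvScanStep (h, 1, 1)).2.2 ≤ m := by
      rw [← hx1]
      rw [hcnt x1]
      exact hmmax x1 (((hF ▸ hFP).mem_iff).mp hx1F)
    show m = (t.foldl pvScanStep (h, 1, 1)).2.2
    omega

-- ===== VERDICT (by name: the statement is the Claim_ definition above) =====
theorem get_max_nseq_spec : Claim_equal_get_max_nseq := by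
  intro seq nseq _ hpre
  exact pv_main seq nseq hpre
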